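-- pv_equiv track=rewrite | github.com/Jyosin/Spatio-Temporal-Puzzle | Transformer_based_model_3DCubicPuzzle/models/MViTv2.py | calc_mvit_feature_geometry
-- ===== SOURCE A (Python) =====
-- def calc_mvit_feature_geometry(
--         num_frames,
--         patch_stride,
--         train_crop_size,
--         depth,
--         pool_q_stride
-- ):
--     feat_size = [
--         [
--             (
--                 num_frames // patch_stride[0]
--                 if len(patch_stride) > 2
--                 else 1
--             ),
--             train_crop_size // patch_stride[-2],
--             train_crop_size // patch_stride[-1],
--         ]
--         for i in range(depth)
--     ]
--     feat_stride = [
--         [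
--             patch_stride[0] if len(patch_stride) > 2 else 1,
--             patch_stride[-2],
--             patch_stride[-1],
--         ]
--         for i in range(depth)
--     ]
--     for _, x in enumerate(pool_q_stride):
--         for i in range(depth):
--             if i >= x[0]:
--                 for j in range(len(feat_size[i])):
--                     feat_size[i][j] = feat_size[i][j] // x[j + 1]
--                     feat_stride[i][j] = feat_stride[i][j] * x[j + 1]
--     return feat_size, feat_stride
-- ===== SOURCE B (Python) =====
-- def calc_mvit_feature_geometry(
--         num_frames,
--         patch_stride,
--         train_crop_size,
--         depth,
--         pool_q_stride
-- ):
--     # Rows only change at layers where a new pool entry becomes applicable: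
--     # recompute at those change points, replicate the row in between.
--     change = {0}
--     for x in pool_q_stride:
--         if 0 < depth and 0 < x[0] < depth:
--             change.add(x[0])
--     feat_size, feat_stride = [], []
--     row_s = row_t = None
--     for i in range(depth):
--         if i in change:
--             row_s = [
--                 num_frames // patch_stride[0] if len(patch_stride) > 2 else 1,
--                 train_crop_size // patch_stride[-2],
--                 train_crop_size // patch_stride[-1],
--             ]
--             row_t = [
--                 patch_stride[0] if len(patch_stride) > 2 else 1,
--                 patch_stride[-2],
--                 patch_stride[-1],
--             ]
--             for x in pool_q_stride:
--                 if x[0] <= i: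
--                     row_s = [a // b for a, b in zip(row_s, x[1:4])]
--                     row_t = [a * b for a, b in zip(row_t, x[1:4])]
--         feat_size.append(row_s)
--         feat_stride.append(row_t)
--     return feat_size, feat_stride
-- ===== Notes on version B (the rewrite author's own statement) =====
-- stated objective: faster
-- what changed: A mutates a depth-by-3 table elementwise for every (pool entry, layer) pair; B is a change-point algorithm: it collects the layer indices where a new pool entry becomes applicable, recomputes the row only at those points and replicates it across the layers in between.
import Mathlib
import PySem

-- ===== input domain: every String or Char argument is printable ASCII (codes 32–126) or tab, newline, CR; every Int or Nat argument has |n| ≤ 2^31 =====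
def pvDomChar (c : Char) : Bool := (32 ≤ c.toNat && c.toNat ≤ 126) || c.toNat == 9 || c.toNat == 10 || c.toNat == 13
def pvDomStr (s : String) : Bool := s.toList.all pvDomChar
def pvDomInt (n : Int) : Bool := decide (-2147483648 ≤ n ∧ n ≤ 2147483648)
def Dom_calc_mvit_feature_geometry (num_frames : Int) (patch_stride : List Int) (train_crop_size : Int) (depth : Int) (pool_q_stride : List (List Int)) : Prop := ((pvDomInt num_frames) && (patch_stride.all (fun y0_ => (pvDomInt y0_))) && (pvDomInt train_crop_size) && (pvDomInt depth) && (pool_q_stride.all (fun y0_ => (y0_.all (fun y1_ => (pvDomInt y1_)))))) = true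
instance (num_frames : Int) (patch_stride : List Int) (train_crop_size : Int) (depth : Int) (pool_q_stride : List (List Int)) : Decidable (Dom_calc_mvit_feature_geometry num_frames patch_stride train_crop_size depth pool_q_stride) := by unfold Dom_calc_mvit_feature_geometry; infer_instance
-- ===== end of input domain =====

-- B replaces A's per-(entry, layer) in-place table mutation by a change-point algorithm: a row is
-- recomputed only at the layer indices where a new pool entry becomes applicable and replicated in
-- between, O(m^2 + depth) row work instead of O(m * depth). Return values only; no argument is mutated.

-- ===== PORT A =====
-- inner 'for j in range(len(feat_size[i]))' loop of A, dividing / multiplying each entry of a row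
def pvDivRow (x : List Int) (row : List Int) : List Int :=
  (List.range row.length).foldl
    (fun r j => r.set j (PySem.Int.floordiv (r.getD j 0) ((PySem.List.pyGet? x ((j : Int) + 1)).getD 0))) row

def pvMulRow (x : List Int) (row : List Int) : List Int :=
  (List.range row.length).foldl
    (fun r j => r.set j ((r.getD j 0) * ((PySem.List.pyGet? x ((j : Int) + 1)).getD 0))) row

-- A's 'for i in range(depth)' loop for one pool_q_stride entry x
def pvStepA (depth : Int) (x : List Int) (st : List (List Int) × List (List Int)) :
    List (List Int) × List (List Int) :=
  (List.range depth.toNat).foldl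
    (fun st (i : Nat) =>
      if (PySem.List.pyGet? x 0).getD 0 ≤ (i : Int) then
        (st.1.modify i (pvDivRow x), st.2.modify i (pvMulRow x))
      else st) st

def calc_mvit_feature_geometry (num_frames : Int) (patch_stride : List Int) (train_crop_size : Int) (depth : Int) (pool_q_stride : List (List Int)) : List (List Int) × List (List Int) :=
  let t0 : Int := if 2 < patch_stride.length then PySem.Int.floordiv num_frames ((PySem.List.pyGet? patch_stride 0).getD 0) else 1
  let s0 : Int := if 2 < patch_stride.length then (PySem.List.pyGet? patch_stride 0).getD 0 else 1
  let pm2 : Int := (PySem.List.pyGet? patch_stride (-2)).getD 0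
  let pm1 : Int := (PySem.List.pyGet? patch_stride (-1)).getD 0
  let feat_size : List (List Int) := (List.range depth.toNat).map
    (fun _ => [t0, PySem.Int.floordiv train_crop_size pm2, PySem.Int.floordiv train_crop_size pm1])
  let feat_stride : List (List Int) := (List.range depth.toNat).map (fun _ => [s0, pm2, pm1])
  pool_q_stride.foldl (fun st x => pvStepA depth x st) (feat_size, feat_stride)

-- ===== PORT B =====
-- B's change-point set: layer 0 plus every x[0] with 0 < x[0] < depth ('0 < depth and 0 < x[0] < depth')
def pvChange (depth : Int) (pool_q_stride : List (List Int)) : PySem.Set Int :=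
  pool_q_stride.foldl
    (fun s x =>
      if 0 < depth ∧ 0 < (PySem.List.pyGet? x 0).getD 0 ∧ (PySem.List.pyGet? x 0).getD 0 < depth
      then PySem.Set.add s ((PySem.List.pyGet? x 0).getD 0) else s)
    (PySem.Set.ofList [0])

-- B's recompute at a change point i: fold the applicable pool entries over the initial geometry
def pvRecompute (pool_q_stride : List (List Int)) (i : Nat) (init : List Int × List Int) :
    List Int × List Int :=
  pool_q_stride.foldl
    (fun r x =>
      if (PySem.List.pyGet? x 0).getD 0 ≤ (i : Int) then
        (List.zipWith (fun a b => PySem.Int.floordiv a b) r.1 (PySem.List.slice x (some 1) (some 4)),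
         List.zipWith (fun a b => a * b) r.2 (PySem.List.slice x (some 1) (some 4)))
      else r) init

-- one iteration of B's 'for i in range(depth)' loop (state = (current rows, accumulated lists));
-- Python's row_s/row_t start as None, but 0 ∈ change so they are set before first use: ([], []) is a dummy
def pvStepB (change : PySem.Set Int) (pool_q_stride : List (List Int)) (base : List Int × List Int)
    (st : (List Int × List Int) × (List (List Int) × List (List Int))) (i : Nat) :
    (List Int × List Int) × (List (List Int) × List (List Int)) :=
  let rows := if PySem.Set.contains change (i : Int) then pvRecompute pool_q_stride i base else st.1
  (rows, (st.2.1 ++ [rows.1], st.2.2 ++ [rows.2]))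

def calc_mvit_feature_geometry_alt (num_frames : Int) (patch_stride : List Int) (train_crop_size : Int) (depth : Int) (pool_q_stride : List (List Int)) : List (List Int) × List (List Int) :=
  let base : List Int × List Int :=
    ([if 2 < patch_stride.length then PySem.Int.floordiv num_frames ((PySem.List.pyGet? patch_stride 0).getD 0) else 1,
      PySem.Int.floordiv train_crop_size ((PySem.List.pyGet? patch_stride (-2)).getD 0),
      PySem.Int.floordiv train_crop_size ((PySem.List.pyGet? patch_stride (-1)).getD 0)],
     [if 2 < patch_stride.length then (PySem.List.pyGet? patch_stride 0).getD 0 else 1,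
      (PySem.List.pyGet? patch_stride (-2)).getD 0,
      (PySem.List.pyGet? patch_stride (-1)).getD 0])
  ((List.range depth.toNat).foldl
    (pvStepB (pvChange depth pool_q_stride) pool_q_stride base) (([], []), ([], []))).2

-- ===== PRECONDITION & SPEC =====
-- Pre_ excludes exactly the inputs on which A raises: with depth > 0, a patch_stride shorter than 2,
-- a zero divisor in it, or a pool entry that is empty or (when applicable to some layer) shorter
-- than 4 or carrying a zero stride; with depth ≤ 0 A touches nothing and everything is admitted.
def Pre_calc_mvit_feature_geometry (num_frames : Int) (patch_stride : List Int) (train_crop_size : Int) (depth : Int) (pool_q_stride : List (List Int)) : Prop :=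
  0 < depth →
    (2 ≤ patch_stride.length ∧
     (PySem.List.pyGet? patch_stride (-2)).getD 0 ≠ 0 ∧
     (PySem.List.pyGet? patch_stride (-1)).getD 0 ≠ 0 ∧
     (2 < patch_stride.length → (PySem.List.pyGet? patch_stride 0).getD 0 ≠ 0) ∧
     ∀ x ∈ pool_q_stride, x ≠ [] ∧
       ((PySem.List.pyGet? x 0).getD 0 < depth →
         4 ≤ x.length ∧ (PySem.List.pyGet? x 1).getD 0 ≠ 0 ∧
         (PySem.List.pyGet? x 2).getD 0 ≠ 0 ∧ (PySem.List.pyGet? x 3).getD 0 ≠ 0))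

instance (num_frames : Int) (patch_stride : List Int) (train_crop_size : Int) (depth : Int) (pool_q_stride : List (List Int)) : Decidable (Pre_calc_mvit_feature_geometry num_frames patch_stride train_crop_size depth pool_q_stride) := by unfold Pre_calc_mvit_feature_geometry; infer_instance

def pvWitness_calc_mvit_feature_geometry : Int × List Int × Int × Int × List (List Int) :=
  (8, [2, 4, 4], 224, 3, [[1, 1, 2, 2], [2, 1, 2, 2]])

def Spec_calc_mvit_feature_geometry (num_frames : Int) (patch_stride : List Int) (train_crop_size : Int) (depth : Int) (pool_q_stride : List (List Int)) (out : List (List Int) × List (List Int)) : Prop := out = calc_mvit_feature_geometry_alt num_frames patch_stride train_crop_size depth pool_q_stride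
instance (num_frames : Int) (patch_stride : List Int) (train_crop_size : Int) (depth : Int) (pool_q_stride : List (List Int)) (out : List (List Int) × List (List Int)) : Decidable (Spec_calc_mvit_feature_geometry num_frames patch_stride train_crop_size depth pool_q_stride out) := by unfold Spec_calc_mvit_feature_geometry; infer_instance

-- ===== CLAIM (what is proved, stated in full; the proofs are below) =====
def Claim_equal_calc_mvit_feature_geometry : Prop := ∀ (num_frames : Int) (patch_stride : List Int) (train_crop_size : Int) (depth : Int) (pool_q_stride : List (List Int)), Dom_calc_mvit_feature_geometry num_frames patch_stride train_crop_size depth pool_q_stride → Pre_calc_mvit_feature_geometry num_frames patch_stride train_crop_size depth pool_q_stride → Spec_calc_mvit_feature_geometry num_frames patch_stride train_crop_size depth pool_q_stride (calc_mvit_feature_geometry num_frames patch_stride train_crop_size depth pool_q_stride)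

-- ===== LEMMAS AND PROOFS =====

theorem pvDivRow3 (x : List Int) (a b c : Int) :
    pvDivRow x [a, b, c] =
      [PySem.Int.floordiv a ((PySem.List.pyGet? x 1).getD 0),
       PySem.Int.floordiv b ((PySem.List.pyGet? x 2).getD 0),
       PySem.Int.floordiv c ((PySem.List.pyGet? x 3).getD 0)] := by
  show (List.range 3).foldl _ _ = _
  norm_num [List.range_succ]
theorem pvMulRow3 (x : List Int) (a b c : Int) :
    pvMulRow x [a, b, c] =
      [a * (PySem.List.pyGet? x 1).getD 0,
       b * (PySem.List.pyGet? x 2).getD 0,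
       c * (PySem.List.pyGet? x 3).getD 0] := by
  show (List.range 3).foldl _ _ = _
  norm_num [List.range_succ]

theorem pvStepA_getElem (x : List Int) (m : Nat) (fs ft : List (List Int)) (k : Nat) :
    (((List.range m).foldl
        (fun st (i : Nat) =>
          if (PySem.List.pyGet? x 0).getD 0 ≤ (i : Int) then
            (st.1.modify i (pvDivRow x), st.2.modify i (pvMulRow x))
          else st) (fs, ft)).1[k]? =
        (if k < m ∧ (PySem.List.pyGet? x 0).getD 0 ≤ (k : Int) then fs[k]?.map (pvDivRow x) else fs[k]?)) ∧
    (((List.range m).foldl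
        (fun st (i : Nat) =>
          if (PySem.List.pyGet? x 0).getD 0 ≤ (i : Int) then
            (st.1.modify i (pvDivRow x), st.2.modify i (pvMulRow x))
          else st) (fs, ft)).2[k]? =
        (if k < m ∧ (PySem.List.pyGet? x 0).getD 0 ≤ (k : Int) then ft[k]?.map (pvMulRow x) else ft[k]?)) := by
  induction m with
  | zero => simp
  | succ m ih =>
    rw [List.range_succ, List.foldl_append, List.foldl_cons, List.foldl_nil]
    by_cases h : (PySem.List.pyGet? x 0).getD 0 ≤ (m : Int)
    · rw [if_pos h]
      constructor
      · show (_root_.List.modify _ _ _)[k]? = _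
        rw [List.getElem?_modify]
        by_cases hmk : m = k
        · subst hmk
          rw [ih.1]
          have hnm : ¬ (m < m ∧ (PySem.List.pyGet? x 0).getD 0 ≤ (m : Int)) := by omega
          rw [if_neg hnm, if_pos ⟨Nat.lt_succ_self m, h⟩]
          cases fs[m]? <;> simp
        · have h3 : (k ≤ m) ↔ (k < m) := by omega
          simp [hmk, ih.1, h3]
      · show (_root_.List.modify _ _ _)[k]? = _
        rw [List.getElem?_modify]
        by_cases hmk : m = k
        · subst hmk
          rw [ih.2]
          have hnm : ¬ (m < m ∧ (PySem.List.pyGet? x 0).getD 0 ≤ (m : Int)) := by omega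
          rw [if_neg hnm, if_pos ⟨Nat.lt_succ_self m, h⟩]
          cases ft[m]? <;> simp
        · have h3 : (k ≤ m) ↔ (k < m) := by omega
          simp [hmk, ih.2, h3]
    · rw [if_neg h]
      constructor
      · rw [ih.1]
        by_cases hmk : m = k
        · subst hmk
          have h1 : ¬ (m < m ∧ (PySem.List.pyGet? x 0).getD 0 ≤ (m : Int)) := by omega
          have h2 : ¬ (m < m + 1 ∧ (PySem.List.pyGet? x 0).getD 0 ≤ (m : Int)) := fun hh => h hh.2
          rw [if_neg h1, if_neg h2]
        · by_cases hc : (PySem.List.pyGet? x 0).getD 0 ≤ (k : Int)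
          · have h3 : (k < m + 1) ↔ (k < m) := by omega
            simp [hc, h3]
          · simp [hc]
      · rw [ih.2]
        by_cases hmk : m = k
        · subst hmk
          have h1 : ¬ (m < m ∧ (PySem.List.pyGet? x 0).getD 0 ≤ (m : Int)) := by omega
          have h2 : ¬ (m < m + 1 ∧ (PySem.List.pyGet? x 0).getD 0 ≤ (m : Int)) := fun hh => h hh.2
          rw [if_neg h1, if_neg h2]
        · by_cases hc : (PySem.List.pyGet? x 0).getD 0 ≤ (k : Int)
          · have h3 : (k < m + 1) ↔ (k < m) := by omega
            simp [hc, h3]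
          · simp [hc]

theorem pvStepA_map (d : Int) (x : List Int) (F G : Nat → List Int) :
    pvStepA d x ((List.range d.toNat).map F, (List.range d.toNat).map G) =
      ((List.range d.toNat).map (fun (i : Nat) => if (PySem.List.pyGet? x 0).getD 0 ≤ (i : Int) then pvDivRow x (F i) else F i),
       (List.range d.toNat).map (fun (i : Nat) => if (PySem.List.pyGet? x 0).getD 0 ≤ (i : Int) then pvMulRow x (G i) else G i)) := by
  unfold pvStepA
  have h := fun k => pvStepA_getElem x d.toNat ((List.range d.toNat).map F) ((List.range d.toNat).map G) k
  refine Prod.ext ?_ ?_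
  · apply List.ext_getElem?
    intro k
    rw [(h k).1, List.getElem?_map, List.getElem?_map]
    by_cases hk : k < d.toNat
    · simp only [List.getElem?_range hk, Option.map_some]
      by_cases hc : (PySem.List.pyGet? x 0).getD 0 ≤ (k : Int)
      · simp [hk, hc]
      · simp [hk, hc]
    · simp [hk]
  · apply List.ext_getElem?
    intro k
    rw [(h k).2, List.getElem?_map, List.getElem?_map]
    by_cases hk : k < d.toNat
    · simp only [List.getElem?_range hk, Option.map_some]
      by_cases hc : (PySem.List.pyGet? x 0).getD 0 ≤ (k : Int)
      · simp [hk, hc]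
      · simp [hk, hc]
    · simp [hk]

theorem pvFoldA_map (d : Int) (xs : List (List Int)) (F G : Nat → List Int) :
    xs.foldl (fun st x => pvStepA d x st) ((List.range d.toNat).map F, (List.range d.toNat).map G) =
      ((List.range d.toNat).map (fun (i : Nat) =>
          xs.foldl (fun row x => if (PySem.List.pyGet? x 0).getD 0 ≤ (i : Int) then pvDivRow x row else row) (F i)),
       (List.range d.toNat).map (fun (i : Nat) =>
          xs.foldl (fun row x => if (PySem.List.pyGet? x 0).getD 0 ≤ (i : Int) then pvMulRow x row else row) (G i))) := by
  induction xs generalizing F G with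
  | nil => simp
  | cons x xs ih =>
    simp only [List.foldl_cons]
    rw [pvStepA_map, ih]

theorem pvChainDivRow (i : Nat) (xs : List (List Int)) (a b c : Int) :
    xs.foldl (fun row x => if (PySem.List.pyGet? x 0).getD 0 ≤ (i : Int) then pvDivRow x row else row) [a, b, c] =
      [xs.foldl (fun r x => if (PySem.List.pyGet? x 0).getD 0 ≤ (i : Int) then PySem.Int.floordiv r ((PySem.List.pyGet? x 1).getD 0) else r) a,
       xs.foldl (fun r x => if (PySem.List.pyGet? x 0).getD 0 ≤ (i : Int) then PySem.Int.floordiv r ((PySem.List.pyGet? x 2).getD 0) else r) b,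
       xs.foldl (fun r x => if (PySem.List.pyGet? x 0).getD 0 ≤ (i : Int) then PySem.Int.floordiv r ((PySem.List.pyGet? x 3).getD 0) else r) c] := by
  induction xs generalizing a b c with
  | nil => rfl
  | cons x xs ih =>
    simp only [List.foldl_cons]
    by_cases h : (PySem.List.pyGet? x 0).getD 0 ≤ (i : Int)
    · simp only [if_pos h, pvDivRow3, ih]
    · simp only [if_neg h, ih]

theorem pvChainMulRow (i : Nat) (xs : List (List Int)) (a b c : Int) :
    xs.foldl (fun row x => if (PySem.List.pyGet? x 0).getD 0 ≤ (i : Int) then pvMulRow x row else row) [a, b, c] =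
      [xs.foldl (fun r x => if (PySem.List.pyGet? x 0).getD 0 ≤ (i : Int) then r * (PySem.List.pyGet? x 1).getD 0 else r) a,
       xs.foldl (fun r x => if (PySem.List.pyGet? x 0).getD 0 ≤ (i : Int) then r * (PySem.List.pyGet? x 2).getD 0 else r) b,
       xs.foldl (fun r x => if (PySem.List.pyGet? x 0).getD 0 ≤ (i : Int) then r * (PySem.List.pyGet? x 3).getD 0 else r) c] := by
  induction xs generalizing a b c with
  | nil => rfl
  | cons x xs ih =>
    simp only [List.foldl_cons]
    by_cases h : (PySem.List.pyGet? x 0).getD 0 ≤ (i : Int)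
    · simp only [if_pos h, pvMulRow3, ih]
    · simp only [if_neg h, ih]

-- x[1:4] of a pool entry of length ≥ 4
theorem pvSlice14 (x : List Int) (h : 4 ≤ x.length) :
    PySem.List.slice x (some 1) (some 4) =
      [(PySem.List.pyGet? x 1).getD 0, (PySem.List.pyGet? x 2).getD 0, (PySem.List.pyGet? x 3).getD 0] := by
  match x, h with
  | x0 :: x1 :: x2 :: x3 :: rest, _ =>
    have h14 : PySem.List.slice (x0 :: x1 :: x2 :: x3 :: rest) (some ((1 : Nat) : Int)) (some ((4 : Nat) : Int)) =
        ((x0 :: x1 :: x2 :: x3 :: rest).drop 1).take (4 - 1) := PySem.List.slice_natCast _ 1 4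
    norm_num at h14
    rw [h14]
    norm_num [PySem.List.pyGet?, PySem.List.pyIdx?]
    split_ifs <;> first | exact ⟨rfl, rfl, rfl⟩ | omega

theorem pvZipDiv3 (x : List Int) (h : 4 ≤ x.length) (a b c : Int) :
    List.zipWith (fun s t => PySem.Int.floordiv s t) [a, b, c] (PySem.List.slice x (some 1) (some 4)) =
      [PySem.Int.floordiv a ((PySem.List.pyGet? x 1).getD 0),
       PySem.Int.floordiv b ((PySem.List.pyGet? x 2).getD 0),
       PySem.Int.floordiv c ((PySem.List.pyGet? x 3).getD 0)] := by
  rw [pvSlice14 x h]; rfl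

theorem pvZipMul3 (x : List Int) (h : 4 ≤ x.length) (a b c : Int) :
    List.zipWith (fun s t => s * t) [a, b, c] (PySem.List.slice x (some 1) (some 4)) =
      [a * (PySem.List.pyGet? x 1).getD 0,
       b * (PySem.List.pyGet? x 2).getD 0,
       c * (PySem.List.pyGet? x 3).getD 0] := by
  rw [pvSlice14 x h]; rfl

-- B's pair fold at a fixed layer, split into the three dimensions (same right-hand sides as A's chains)
theorem pvRecomputeChain (i : Nat) (xs : List (List Int))
    (H : ∀ x ∈ xs, (PySem.List.pyGet? x 0).getD 0 ≤ (i : Int) → 4 ≤ x.length) (a b c p q r : Int) :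
    pvRecompute xs i ([a, b, c], [p, q, r]) =
      ([xs.foldl (fun r x => if (PySem.List.pyGet? x 0).getD 0 ≤ (i : Int) then PySem.Int.floordiv r ((PySem.List.pyGet? x 1).getD 0) else r) a,
        xs.foldl (fun r x => if (PySem.List.pyGet? x 0).getD 0 ≤ (i : Int) then PySem.Int.floordiv r ((PySem.List.pyGet? x 2).getD 0) else r) b,
        xs.foldl (fun r x => if (PySem.List.pyGet? x 0).getD 0 ≤ (i : Int) then PySem.Int.floordiv r ((PySem.List.pyGet? x 3).getD 0) else r) c],
       [xs.foldl (fun s x => if (PySem.List.pyGet? x 0).getD 0 ≤ (i : Int) then s * (PySem.List.pyGet? x 1).getD 0 else s) p,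
        xs.foldl (fun s x => if (PySem.List.pyGet? x 0).getD 0 ≤ (i : Int) then s * (PySem.List.pyGet? x 2).getD 0 else s) q,
        xs.foldl (fun s x => if (PySem.List.pyGet? x 0).getD 0 ≤ (i : Int) then s * (PySem.List.pyGet? x 3).getD 0 else s) r]) := by
  induction xs generalizing a b c p q r with
  | nil => rfl
  | cons x xs ih =>
    have Hxs : ∀ y ∈ xs, (PySem.List.pyGet? y 0).getD 0 ≤ (i : Int) → 4 ≤ y.length :=
      fun y hy => H y (List.mem_cons_of_mem x hy)
    unfold pvRecompute
    simp only [List.foldl_cons]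
    by_cases h : (PySem.List.pyGet? x 0).getD 0 ≤ (i : Int)
    · have h4 := H x List.mem_cons_self h
      show pvRecompute xs i _ = _
      simp only [if_pos h, pvZipDiv3 x h4, pvZipMul3 x h4]
      exact ih Hxs _ _ _ _ _ _
    · show pvRecompute xs i _ = _
      simp only [if_neg h]
      exact ih Hxs _ _ _ _ _ _

-- membership in B's change-point set
theorem pvMemChange (d : Int) (xs : List (List Int)) (v : Int) :
    v ∈ pvChange d xs ↔
      v = 0 ∨ (0 < d ∧ 0 < v ∧ v < d ∧ ∃ x ∈ xs, (PySem.List.pyGet? x 0).getD 0 = v) := by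
  have gen : ∀ (s : PySem.Set Int), v ∈ xs.foldl
      (fun s x =>
        if 0 < d ∧ 0 < (PySem.List.pyGet? x 0).getD 0 ∧ (PySem.List.pyGet? x 0).getD 0 < d
        then PySem.Set.add s ((PySem.List.pyGet? x 0).getD 0) else s) s ↔
      v ∈ s ∨ (0 < d ∧ 0 < v ∧ v < d ∧ ∃ x ∈ xs, (PySem.List.pyGet? x 0).getD 0 = v) := by
    induction xs with
    | nil => simp
    | cons x xs ih =>
      intro s
      simp only [List.foldl_cons]
      by_cases h : 0 < d ∧ 0 < (PySem.List.pyGet? x 0).getD 0 ∧ (PySem.List.pyGet? x 0).getD 0 < d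
      · rw [if_pos h, ih]
        simp only [PySem.Set.mem_add, List.mem_cons]
        constructor
        · rintro (⟨hs | hv⟩ | ⟨hd, h1, h2, y, hy, hv⟩)
          · exact Or.inl hs
          · exact Or.inr ⟨h.1, hv ▸ h.2.1, hv ▸ h.2.2, x, Or.inl rfl, hv.symm⟩
          · exact Or.inr ⟨hd, h1, h2, y, Or.inr hy, hv⟩
        · rintro (hs | ⟨hd, h1, h2, y, (rfl | hy), hv⟩)
          · exact Or.inl (Or.inl hs)
          · exact Or.inl (Or.inr hv.symm)
          · exact Or.inr ⟨hd, h1, h2, y, hy, hv⟩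
      · rw [if_neg h, ih]
        simp only [List.mem_cons]
        constructor
        · rintro (hs | ⟨hd, h1, h2, y, hy, hv⟩)
          · exact Or.inl hs
          · exact Or.inr ⟨hd, h1, h2, y, Or.inr hy, hv⟩
        · rintro (hs | ⟨hd, h1, h2, y, (rfl | hy), hv⟩)
          · exact Or.inl hs
          · exact absurd ⟨hd, hv ▸ h1, hv ▸ h2⟩ h
          · exact Or.inr ⟨hd, h1, h2, y, hy, hv⟩
  unfold pvChange
  rw [gen]
  simp [PySem.Set.mem_ofList]

-- a layer that is no change point has the same row as the layer below it
theorem pvRecompute_stable (xs : List (List Int)) (base : List Int × List Int) (n : Nat)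
    (hn : 0 < n) (h : ∀ x ∈ xs, (PySem.List.pyGet? x 0).getD 0 ≠ (n : Int)) :
    pvRecompute xs n base = pvRecompute xs (n - 1) base := by
  induction xs generalizing base with
  | nil => rfl
  | cons x xs ih =>
    have hx := h x List.mem_cons_self
    have hxs : ∀ y ∈ xs, (PySem.List.pyGet? y 0).getD 0 ≠ (n : Int) :=
      fun y hy => h y (List.mem_cons_of_mem x hy)
    have hcast : ((n - 1 : Nat) : Int) = (n : Int) - 1 := by omega
    unfold pvRecompute
    simp only [List.foldl_cons]
    by_cases hc : (PySem.List.pyGet? x 0).getD 0 ≤ (n : Int)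
    · have hc' : (PySem.List.pyGet? x 0).getD 0 ≤ ((n - 1 : Nat) : Int) := by
        rw [hcast]; omega
      rw [if_pos hc, if_pos hc']
      exact ih _ hxs
    · have hc' : ¬ (PySem.List.pyGet? x 0).getD 0 ≤ ((n - 1 : Nat) : Int) := by
        rw [hcast]; omega
      rw [if_neg hc, if_neg hc']
      exact ih _ hxs

-- B's loop invariant: after n iterations the accumulators hold the rows of layers 0..n-1
theorem pvB_loop (xs : List (List Int)) (d : Int) (base : List Int × List Int)
    (hm : ∀ (n : Nat), 0 < n → (n : Int) < d →
      ((n : Int) ∈ pvChange d xs ∨ ∀ x ∈ xs, (PySem.List.pyGet? x 0).getD 0 ≠ (n : Int)))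
    (n : Nat) (hn : 0 < n) (hnd : (n : Int) ≤ d) :
    (List.range n).foldl (pvStepB (pvChange d xs) xs base) (([], []), ([], [])) =
      (pvRecompute xs (n - 1) base,
       ((List.range n).map (fun i => (pvRecompute xs i base).1),
        (List.range n).map (fun i => (pvRecompute xs i base).2))) := by
  induction n with
  | zero => omega
  | succ n ih =>
    by_cases hn0 : n = 0
    · subst hn0
      have h0 : (0 : Int) ∈ pvChange d xs := (pvMemChange d xs 0).mpr (Or.inl rfl)
      simp [List.range_succ, pvStepB, h0]
    · have hnpos : 0 < n := Nat.pos_of_ne_zero hn0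
      have hnd' : (n : Int) ≤ d := by omega
      rw [List.range_succ, List.foldl_append, List.foldl_cons, List.foldl_nil,
        ih hnpos hnd']
      have hrow : (if PySem.Set.contains (pvChange d xs) ((n : Nat) : Int) then
          pvRecompute xs n base else pvRecompute xs (n - 1) base) = pvRecompute xs n base := by
        by_cases hc : PySem.Set.contains (pvChange d xs) ((n : Nat) : Int) = true
        · rw [if_pos hc]
        · rw [if_neg hc]
          have hnotmem : ((n : Nat) : Int) ∉ pvChange d xs := by
            intro hmem
            exact hc ((PySem.Set.contains_iff _ _).mpr hmem)
          have hne : ∀ x ∈ xs, (PySem.List.pyGet? x 0).getD 0 ≠ (n : Int) := by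
            rcases hm n hnpos (by omega) with hmem | hne
            · exact absurd hmem hnotmem
            · exact hne
          exact (pvRecompute_stable xs base n hnpos hne).symm
      unfold pvStepB
      simp only [hrow, List.map_append, List.map_cons, List.map_nil]
      rfl

-- ===== VERDICT (by name: the statement is the Claim_ definition above) =====
theorem calc_mvit_feature_geometry_spec : Claim_equal_calc_mvit_feature_geometry := by
  unfold Claim_equal_calc_mvit_feature_geometry
  intro nf ps tcs d pqs _ hpre
  unfold Spec_calc_mvit_feature_geometry
  by_cases hd : 0 < d
  case neg =>
    have hz : d.toNat = 0 := by omega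
    have hA : ∀ (ys : List (List Int)) (st : List (List Int) × List (List Int)),
        ys.foldl (fun st x => pvStepA d x st) st = st := by
      intro ys
      induction ys with
      | nil => intro st; rfl
      | cons y ys ih => intro st; simpa [List.foldl_cons, pvStepA, hz] using ih st
    simp [calc_mvit_feature_geometry, calc_mvit_feature_geometry_alt, hz, hA]
  case pos =>
  obtain ⟨-, -, -, -, hP⟩ := hpre hd
  have hlen : ∀ (i : Nat), i < d.toNat →
      ∀ x ∈ pqs, (PySem.List.pyGet? x 0).getD 0 ≤ (i : Int) → 4 ≤ x.length := by
    intro i hi x hx hc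
    have hii : (i : Int) < d := by omega
    exact ((hP x hx).2 (lt_of_le_of_lt hc hii)).1
  have hm : ∀ (n : Nat), 0 < n → (n : Int) < d →
      ((n : Int) ∈ pvChange d pqs ∨ ∀ x ∈ pqs, (PySem.List.pyGet? x 0).getD 0 ≠ (n : Int)) := by
    intro n hn hnd
    by_cases hex : ∃ x ∈ pqs, (PySem.List.pyGet? x 0).getD 0 = (n : Int)
    · exact Or.inl ((pvMemChange d pqs _).mpr
        (Or.inr ⟨hd, by exact_mod_cast Int.natCast_pos.mpr hn, hnd, hex⟩))
    · exact Or.inr (fun x hx hc => hex ⟨x, hx, hc⟩)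
  have hdn : 0 < d.toNat := by omega
  have hdd : ((d.toNat : Nat) : Int) ≤ d := by omega
  simp only [calc_mvit_feature_geometry, calc_mvit_feature_geometry_alt]
  rw [pvFoldA_map, pvB_loop pqs d _ hm d.toNat hdn hdd]
  refine Prod.ext ?_ ?_ <;> dsimp only
  · apply List.map_congr_left
    intro i hi
    rw [List.mem_range] at hi
    rw [pvChainDivRow, pvRecomputeChain i pqs (hlen i hi)]
  · apply List.map_congr_left
    intro i hi
    rw [List.mem_range] at hi
    rw [pvChainMulRow, pvRecomputeChain i pqs (hlen i hi)]
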